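-- pv_equiv track=rewrite | github.com/enricotomasi/GeeksforGeeks_problems | Easy/Completing tasks.py | solve
-- ===== SOURCE A (Python) =====
-- def solve(arr, n, m):
--     # code here
--     mappa = dict()
--
--     for it in arr:
--         mappa[it] = 0
--
--     tanya = True
--
--     t = []
--     m = []
--
--     for i in range(1, n+1):
--         if i in mappa:
--             continue
--
--         if tanya == True:
--             t += [i]
--         else:
--             m += [i]
--
--         tanya = not tanya
--
--     return [t, m]
-- ===== SOURCE B (Python) =====
-- def solve(arr, n, m):
--     assigned = set(arr)
--     missing = [i for i in range(1, n + 1) if i not in assigned]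
--     return [missing[0::2], missing[1::2]]
-- ===== Notes on version B (the rewrite author's own statement) =====
-- stated objective: simpler
-- what changed: B materializes the ordered list of unassigned tasks in one comprehension over a set and splits it by index parity with stride slices, removing A's dict-building pass and the alternation toggle/branch.
import Mathlib
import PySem

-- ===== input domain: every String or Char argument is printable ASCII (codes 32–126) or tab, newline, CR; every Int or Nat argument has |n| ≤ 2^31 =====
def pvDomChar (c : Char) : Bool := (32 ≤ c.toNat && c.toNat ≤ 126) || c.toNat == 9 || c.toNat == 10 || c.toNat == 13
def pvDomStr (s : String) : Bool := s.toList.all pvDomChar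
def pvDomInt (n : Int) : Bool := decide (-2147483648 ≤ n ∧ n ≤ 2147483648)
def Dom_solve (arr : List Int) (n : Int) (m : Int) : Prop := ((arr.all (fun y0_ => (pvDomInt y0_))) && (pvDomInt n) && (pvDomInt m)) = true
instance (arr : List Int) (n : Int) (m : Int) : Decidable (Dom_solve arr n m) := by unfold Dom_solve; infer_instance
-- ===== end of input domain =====

-- B builds the ordered unassigned-task list once and splits it by index-parity stride slices, replacing A's dict pass and alternation toggle (same cost, simpler decomposition).


-- ===== PORT A =====
-- literal port of A: build a dict keyed by arr, then one pass over range(1, n+1)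
-- with a boolean toggle 'tanya' alternating appends to t and m (the parameter m is shadowed, as in A).
def solve (arr : List Int) (n : Int) (m : Int) : List (List Int) :=
  let mappa : PySem.Dict Int Int := arr.foldl (fun d it => d.insert it 0) PySem.Dict.empty
  let st := (PySem.List.pyRange 1 (n + 1) 1).foldl
    (fun (st : Bool × List Int × List Int) i =>
      if mappa.contains i then st
      else if st.1 = true then (!st.1, st.2.1 ++ [i], st.2.2)
      else (!st.1, st.2.1, st.2.2 ++ [i]))
    (true, ([] : List Int), ([] : List Int))
  [st.2.1, st.2.2]

-- ===== PORT B =====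
-- literal port of Source B: assigned set, one comprehension for the missing list, stride-2 slices.
def solve_alt (arr : List Int) (n : Int) (m : Int) : List (List Int) :=
  let assigned : PySem.Set Int := PySem.Set.ofList arr
  let missing := (PySem.List.pyRange 1 (n + 1) 1).filter (fun i => !(PySem.Set.contains assigned i))
  [(PySem.List.slice? missing (some 0) none 2).getD [],
   (PySem.List.slice? missing (some 1) none 2).getD []]

-- ===== PRECONDITION & SPEC =====
def Spec_solve (arr : List Int) (n : Int) (m : Int) (out : List (List Int)) : Prop := out = solve_alt arr n m
instance (arr : List Int) (n : Int) (m : Int) (out : List (List Int)) : Decidable (Spec_solve arr n m out) := by unfold Spec_solve; infer_instance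

-- ===== CLAIM (what is proved, stated in full; the proofs are below) =====
def Claim_equal_solve : Prop := ∀ (arr : List Int) (n : Int) (m : Int), Dom_solve arr n m → Spec_solve arr n m (solve arr n m)

-- ===== LEMMAS AND PROOFS =====

-- elements of a list at even positions (0, 2, 4, …)
def pvEvens {α : Type} : List α → List α
  | [] => []
  | [x] => [x]
  | x :: _ :: xs => x :: pvEvens xs

theorem pvEvens_cons {α : Type} (x : α) (xs : List α) :
    pvEvens (x :: xs) = x :: pvEvens (xs.drop 1) := by
  cases xs <;> simp [pvEvens]

-- a loop that skips elements satisfying p is a fold over the filtered list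
theorem pv_foldl_skip {α β : Type} (p : α → Bool) (g : β → α → β) :
    ∀ (l : List α) (s : β),
      l.foldl (fun st i => if p i then st else g st i) s
        = (l.filter (fun i => !p i)).foldl g s := by
  intro l
  induction l with
  | nil => intro s; rfl
  | cons x xs ih =>
    intro s
    by_cases h : p x = true <;> simp [h, ih]

-- the dict A builds contains exactly the elements of arr
theorem pv_contains_fold (arr : List Int) (i : Int) :
    (arr.foldl (fun d it => d.insert it (0 : Int)) PySem.Dict.empty).contains i
      = (PySem.Set.ofList arr).contains i := by
  rw [Bool.eq_iff_iff, PySem.Dict.contains_iff_mem_keys, PySem.Set.contains_iff,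
    PySem.Dict.keys_foldl_insert]
  simp [PySem.Set.mem_update]

-- the alternating fold distributes a list to (evens, odds) after the accumulators
theorem pv_foldl_alt (L : List Int) : ∀ (t m : List Int),
    ((L.foldl
      (fun (st : Bool × List Int × List Int) i =>
        if st.1 = true then (!st.1, st.2.1 ++ [i], st.2.2)
        else (!st.1, st.2.1, st.2.2 ++ [i]))
      (true, t, m)).2 = (t ++ pvEvens L, m ++ pvEvens (L.drop 1)))
    ∧ ((L.foldl
      (fun (st : Bool × List Int × List Int) i =>
        if st.1 = true then (!st.1, st.2.1 ++ [i], st.2.2)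
        else (!st.1, st.2.1, st.2.2 ++ [i]))
      (false, t, m)).2 = (t ++ pvEvens (L.drop 1), m ++ pvEvens L)) := by
  induction L with
  | nil => intro t m; simp [pvEvens]
  | cons x xs ih =>
    intro t m
    constructor
    · simp only [List.foldl_cons]
      norm_num
      rw [pvEvens_cons, (ih (t ++ [x]) m).2]
      simp
    · simp only [List.foldl_cons]
      norm_num
      rw [pvEvens_cons, (ih t (m ++ [x])).1]
      simp

-- stride-2 filterMap over range is pvEvens
theorem pv_filterMap_range_evens {α : Type} : ∀ (ys : List α),
    List.filterMap (fun k => ys[2 * k]?) (List.range ((ys.length + 1) / 2)) = pvEvens ys := by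
  intro ys
  induction ys using pvEvens.induct with
  | case1 => simp [pvEvens]
  | case2 x => simp [pvEvens, List.range_succ]
  | case3 x y xs ih =>
    have hlen : ((x :: y :: xs).length + 1) / 2 = (xs.length + 1) / 2 + 1 := by
      simp; omega
    rw [hlen, List.range_succ_eq_map, List.filterMap_cons, List.filterMap_map]
    simp only [Nat.mul_zero, List.getElem?_cons_zero]
    show x :: List.filterMap (fun k => (x :: y :: xs)[2 * (k + 1)]?) _ = _
    have : ∀ k : Nat, (x :: y :: xs)[2 * (k + 1)]? = xs[2 * k]? := by
      intro k
      have h2 : 2 * (k + 1) = 2 * k + 1 + 1 := by omega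
      rw [h2, List.getElem?_cons_succ, List.getElem?_cons_succ]
    simp only [this, ih, pvEvens]

theorem pv_slice_zero (xs : List Int) :
    PySem.List.slice? xs (some 0) none 2 = some (pvEvens xs) := by
  rw [← pv_filterMap_range_evens]
  simp only [PySem.List.slice?, PySem.List.sliceIndices]
  norm_num
  have hc : (if 0 < xs.length then (((xs.length : Int) + 2 - 1) / 2).toNat else 0)
      = (xs.length + 1) / 2 := by split <;> omega
  rw [hc]
  congr 1

theorem pv_slice_one_of_ne_nil (xs : List Int) (h : xs ≠ []) :
    PySem.List.slice? xs (some 1) none 2 = some (pvEvens (xs.drop 1)) := by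
  rw [← pv_filterMap_range_evens]
  have hlen : 0 < xs.length := List.length_pos_iff.mpr h
  have hmin : min 1 (xs.length : Int) = 1 := by omega
  simp only [PySem.List.slice?, PySem.List.sliceIndices]
  norm_num
  simp only [hmin]
  have hc : (if 1 < xs.length then (((xs.length : Int) - 1 + 2 - 1) / 2).toNat else 0)
      = (xs.length - 1 + 1) / 2 := by split <;> omega
  rw [hc]
  congr 1
  funext k
  congr 1
  omega

theorem pv_slice_one (xs : List Int) :
    PySem.List.slice? xs (some 1) none 2 = some (pvEvens (xs.drop 1)) := by
  cases xs with
  | nil => rfl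
  | cons x ys => exact pv_slice_one_of_ne_nil (x :: ys) (by simp)

-- ===== VERDICT (by name: the statement is the Claim_ definition above) =====
theorem solve_spec : Claim_equal_solve := by
  intro arr n m _
  show solve arr n m = solve_alt arr n m
  unfold solve solve_alt
  dsimp only
  rw [pv_foldl_skip
    (fun i => (arr.foldl (fun d it => d.insert it (0 : Int)) PySem.Dict.empty).contains i)
    (fun (st : Bool × List Int × List Int) i =>
      if st.1 = true then (!st.1, st.2.1 ++ [i], st.2.2)
      else (!st.1, st.2.1, st.2.2 ++ [i]))]
  simp only [pv_contains_fold]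
  have h := (pv_foldl_alt
    ((PySem.List.pyRange 1 (n + 1) 1).filter
      (fun i => !(PySem.Set.contains (PySem.Set.ofList arr) i))) [] []).1
  simp only [List.nil_append] at h
  rw [h, pv_slice_zero, pv_slice_one]
  rfl
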